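-- pv_equiv track=rewrite | github.com/yasirmehmood41/AutomationProject | Content_Engine/script_processor.py | _split_into_scenes
-- ===== SOURCE A (Python) =====
-- from typing import Dict, List, Optional
--
-- def _split_into_scenes(script_text: str) -> List[tuple]:
--     """Split script text into scenes."""
--     # Remove empty lines and normalize whitespace
--     script_text = "\n".join(line.strip() for line in script_text.split("\n") if line.strip())
--
--     # Split by "Scene X:" pattern
--     scenes = []
--     current_title = ""
--     current_content = []
--
--     for line in script_text.split("\n"):
--         if line.lower().startswith("scene"):
--             # If we have a previous scene, save it
--             if current_title and current_content:
--                 scenes.append((current_title, "\n".join(current_content)))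
--             # Start new scene
--             current_title = line
--             current_content = []
--         else:
--             current_content.append(line)
--
--     # Add the last scene
--     if current_title and current_content:
--         scenes.append((current_title, "\n".join(current_content)))
--
--     return scenes
-- ===== SOURCE B (Python) =====
-- from typing import Dict, List, Optional
--
-- def _split_into_scenes(script_text: str) -> List[tuple]:
--     """Split script text into scenes: single index scan locating title lines, content taken by slicing the span to the next title."""
--     # identical normalization: drop empty lines, strip whitespace
--     script_text = "\n".join(line.strip() for line in script_text.split("\n") if line.strip())
--     lines = script_text.split("\n")
--     n = len(lines)
--     scenes = []
--     i = 0
--     while i < n: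
--         if lines[i].lower().startswith("scene"):
--             j = i + 1
--             while j < n and not lines[j].lower().startswith("scene"):
--                 j += 1
--             if i + 1 < j:
--                 scenes.append((lines[i], "\n".join(lines[i + 1:j])))
--             i = j
--         else:
--             i += 1
--     return scenes
-- ===== Notes on version B (the rewrite author's own statement) =====
-- stated objective: alternative
-- what changed: Replaces the running title/content accumulator loop with carry-over state and a duplicated flush guard by a single index scan that finds each title position, advances an inner cursor to the next title, and slices the content span directly.
import Mathlib
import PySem

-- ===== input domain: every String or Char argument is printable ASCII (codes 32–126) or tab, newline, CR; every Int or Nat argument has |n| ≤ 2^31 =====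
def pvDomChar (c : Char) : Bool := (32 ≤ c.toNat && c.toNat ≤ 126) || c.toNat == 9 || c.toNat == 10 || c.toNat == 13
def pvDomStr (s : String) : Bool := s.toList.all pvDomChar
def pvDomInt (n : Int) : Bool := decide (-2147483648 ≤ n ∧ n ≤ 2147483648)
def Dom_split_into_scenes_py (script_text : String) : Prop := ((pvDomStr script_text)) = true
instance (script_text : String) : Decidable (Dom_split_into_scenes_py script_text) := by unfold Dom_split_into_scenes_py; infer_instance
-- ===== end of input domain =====

-- B changes the decomposition only (same cost): index scan over title positions with content slices instead of A's carry-over accumulator loop.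
-- ===== PORT A =====
-- line.lower().startswith("scene")
def pvIsTitle (l : String) : Bool := PySem.Str.startswith (PySem.Str.lower l) "scene"

-- "\n".join(line.strip() for line in script_text.split("\n") if line.strip())
def pvNormText (s : String) : String :=
  PySem.Str.join "\n"
    ((((PySem.Str.split? s "\n").getD []).filter (fun l => PySem.Str.strip l ≠ "")).map PySem.Str.strip)

-- loop body: state (scenes, current_title, current_content)
def pvStep (st : List (String × String) × String × List String) (line : String) :
    List (String × String) × String × List String :=
  if pvIsTitle line then
    (if st.2.1 ≠ "" ∧ st.2.2 ≠ [] then st.1 ++ [(st.2.1, PySem.Str.join "\n" st.2.2)] else st.1,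
     line, [])
  else
    (st.1, st.2.1, st.2.2 ++ [line])

def split_into_scenes_py (script_text : String) : List (String × String) :=
  let lines := (PySem.Str.split? (pvNormText script_text) "\n").getD []
  let st := lines.foldl pvStep ([], "", [])
  -- trailing "add the last scene" guard
  if st.2.1 ≠ "" ∧ st.2.2 ≠ [] then st.1 ++ [(st.2.1, PySem.Str.join "\n" st.2.2)] else st.1

-- ===== PORT B =====
def pvAltTitle (l : String) : Bool := PySem.Str.startswith (PySem.Str.lower l) "scene"

def pvAltNormText (s : String) : String :=
  PySem.Str.join "\n"
    ((((PySem.Str.split? s "\n").getD []).filter (fun l => PySem.Str.strip l ≠ "")).map PySem.Str.strip)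

-- inner while: advance j to the next title (or n); lines[j] is in range since j < n = lines.length
def pvAltSpanEnd (lines : List String) (n j : Nat) : Nat :=
  if _h : j < n then
    if pvAltTitle (lines.getD j "") then j else pvAltSpanEnd lines n (j + 1)
  else j
termination_by n - j

theorem pvAltSpanEnd_le (lines : List String) (n j : Nat) : j ≤ pvAltSpanEnd lines n j := by
  unfold pvAltSpanEnd
  split
  · split
    · exact Nat.le_refl j
    · exact Nat.le_trans (Nat.le_succ j) (pvAltSpanEnd_le lines n (j + 1))
  · exact Nat.le_refl j
termination_by n - j

-- outer while over i; lines[i+1:j] with 0 ≤ i+1 ≤ j ≤ n is exactly (drop (i+1)).take (j-(i+1))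
def pvAltLoop (lines : List String) (n i : Nat) : List (String × String) :=
  if _h : i < n then
    if pvAltTitle (lines.getD i "") then
      let j := pvAltSpanEnd lines n (i + 1)
      (if i + 1 < j then
        [(lines.getD i "", PySem.Str.join "\n" ((lines.drop (i + 1)).take (j - (i + 1))))]
       else []) ++ pvAltLoop lines n j
    else pvAltLoop lines n (i + 1)
  else []
termination_by n - i
decreasing_by
  · have := pvAltSpanEnd_le lines n (i + 1); omega
  · omega

def split_into_scenes_py_alt (script_text : String) : List (String × String) :=
  let lines := (PySem.Str.split? (pvAltNormText script_text) "\n").getD []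
  pvAltLoop lines lines.length 0

-- ===== PRECONDITION & SPEC =====
def Spec_split_into_scenes_py (script_text : String) (out : List (String × String)) : Prop := out = split_into_scenes_py_alt script_text
instance (script_text : String) (out : List (String × String)) : Decidable (Spec_split_into_scenes_py script_text out) := by unfold Spec_split_into_scenes_py; infer_instance

-- ===== CLAIM (what is proved, stated in full; the proofs are below) =====
def Claim_equal_split_into_scenes_py : Prop := ∀ (script_text : String), Dom_split_into_scenes_py script_text → Spec_split_into_scenes_py script_text (split_into_scenes_py script_text)

-- ===== LEMMAS AND PROOFS =====

-- list-level description of B's scan: at a title, emit the non-title span (if non-empty) and continue after it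
def pvGo : List String → List (String × String)
  | [] => []
  | l :: ls =>
    if pvAltTitle l then
      (if ls.takeWhile (fun x => !pvAltTitle x) ≠ [] then
        [(l, PySem.Str.join "\n" (ls.takeWhile (fun x => !pvAltTitle x)))]
       else []) ++ pvGo (ls.dropWhile (fun x => !pvAltTitle x))
    else pvGo ls
termination_by L => L.length
decreasing_by
  · exact Nat.lt_succ_of_le (ls.length_dropWhile_le _)
  · exact Nat.lt_succ_self _

def pvEmit (t : String) (c : List String) : List (String × String) :=
  if c ≠ [] then [(t, PySem.Str.join "\n" c)] else []

-- the flush of A's step, for a state whose title is known non-empty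
def pvEmit' (t : String) (c : List String) : List (String × String) :=
  if t ≠ "" ∧ c ≠ [] then [(t, PySem.Str.join "\n" c)] else []

def pvFinish (st : List (String × String) × String × List String) : List (String × String) :=
  if st.2.1 ≠ "" ∧ st.2.2 ≠ [] then st.1 ++ [(st.2.1, PySem.Str.join "\n" st.2.2)] else st.1

theorem pvGo_cons (l : String) (ls : List String) : pvGo (l :: ls) =
    if pvAltTitle l then
      pvEmit l (ls.takeWhile (fun x => !pvAltTitle x)) ++ pvGo (ls.dropWhile (fun x => !pvAltTitle x))
    else pvGo ls := by
  rw [pvGo.eq_def]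
  simp only [pvEmit]

theorem pvTitle_ne_empty {l : String} (h : pvAltTitle l = true) : l ≠ "" := by
  intro he; subst he; exact absurd h (by decide)

theorem pvStep_eq (st : List (String × String) × String × List String) (l : String) :
    pvStep st l = if pvAltTitle l then
        (st.1 ++ pvEmit' st.2.1 st.2.2, l, []) else (st.1, st.2.1, st.2.2 ++ [l]) := by
  simp [pvStep, pvEmit', pvIsTitle, pvAltTitle]
  split <;> [skip; rfl]
  split <;> simp

theorem pvFold_main (L : List String) : ∀ (sc : List (String × String)) (t : String)
    (c : List String), t ≠ "" →
    pvFinish (L.foldl pvStep (sc, t, c)) =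
      sc ++ pvEmit t (c ++ L.takeWhile (fun x => !pvAltTitle x))
         ++ pvGo (L.dropWhile (fun x => !pvAltTitle x)) := by
  induction L with
  | nil =>
    intro sc t c ht
    simp [pvFinish, pvEmit, ht, pvGo]
    split <;> simp_all
  | cons l ls ih =>
    intro sc t c ht
    by_cases hl : pvAltTitle l = true
    · have hstep : pvStep (sc, t, c) l = (sc ++ pvEmit t c, l, []) := by
        simp [pvStep_eq, hl, pvEmit', pvEmit, ht]
      rw [List.foldl_cons, hstep, ih _ _ _ (pvTitle_ne_empty hl)]
      simp [pvGo_cons, hl, List.append_assoc]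
    · have hstep : pvStep (sc, t, c) l = (sc, t, c ++ [l]) := by
        simp [pvStep_eq, hl]
      rw [List.foldl_cons, hstep, ih _ _ _ ht]
      simp [hl]

theorem pvFold_prologue (L : List String) : ∀ (sc : List (String × String)) (c : List String),
    pvFinish (L.foldl pvStep (sc, "", c)) = sc ++ pvGo L := by
  induction L with
  | nil => intro sc c; simp [pvFinish, pvGo]
  | cons l ls ih =>
    intro sc c
    by_cases hl : pvAltTitle l = true
    · have hstep : pvStep (sc, "", c) l = (sc, l, []) := by
        simp [pvStep_eq, hl, pvEmit']
      rw [List.foldl_cons, hstep, pvFold_main ls sc l [] (pvTitle_ne_empty hl)]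
      simp [pvGo_cons, hl]
    · have hstep : pvStep (sc, "", c) l = (sc, "", c ++ [l]) := by
        simp [pvStep_eq, hl]
      rw [List.foldl_cons, hstep, ih]
      simp [pvGo_cons, hl]

theorem pvTake_len_takeWhile (p : String → Bool) (L : List String) :
    L.take (L.takeWhile p).length = L.takeWhile p := by
  set n := (L.takeWhile p).length with hn
  conv_lhs => rw [← List.takeWhile_append_dropWhile (p := p) (l := L)]
  exact List.take_left' hn.symm

theorem pvDrop_len_takeWhile (p : String → Bool) (L : List String) :
    L.drop (L.takeWhile p).length = L.dropWhile p := by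
  set n := (L.takeWhile p).length with hn
  conv_lhs => rw [← List.takeWhile_append_dropWhile (p := p) (l := L)]
  exact List.drop_left' hn.symm

theorem pvSpanEnd_eq (lines : List String) (j : Nat) (hj : j ≤ lines.length) :
    pvAltSpanEnd lines lines.length j =
      j + ((lines.drop j).takeWhile (fun x => !pvAltTitle x)).length := by
  rw [pvAltSpanEnd.eq_def]
  by_cases h : j < lines.length
  · rw [dif_pos h, List.getD_eq_getElem lines "" h, List.drop_eq_getElem_cons h]
    by_cases ht : pvAltTitle lines[j] = true
    · rw [if_pos ht]
      simp [ht]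
    · rw [if_neg ht, pvSpanEnd_eq lines (j + 1) (by omega)]
      have ht' : pvAltTitle lines[j] = false := by
        exact Bool.eq_false_iff.mpr ht
      rw [List.takeWhile_cons_of_pos (by simp [ht'])]
      simp
      omega
  · rw [dif_neg h, List.drop_eq_nil_of_le (by omega)]
    simp
termination_by lines.length - j

theorem pvAltLoop_eq (lines : List String) (i : Nat) (hi : i ≤ lines.length) :
    pvAltLoop lines lines.length i = pvGo (lines.drop i) := by
  rw [pvAltLoop.eq_def]
  by_cases h : i < lines.length
  · have hdrop : lines.drop i = lines[i] :: lines.drop (i + 1) := List.drop_eq_getElem_cons h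
    rw [dif_pos h, List.getD_eq_getElem lines "" h, hdrop, pvGo_cons]
    by_cases ht : pvAltTitle lines[i] = true
    · rw [if_pos ht]
      have hspan := pvSpanEnd_eq lines (i + 1) (by omega)
      set k := ((lines.drop (i + 1)).takeWhile (fun x => !pvAltTitle x)).length with hk
      have hkle : k ≤ lines.length - (i + 1) := by
        have h1 := (List.takeWhile_sublist (p := fun x => !pvAltTitle x)
          (l := lines.drop (i + 1))).length_le
        simpa [← hk] using h1
      have hdropj : lines.drop (i + 1 + k) = (lines.drop (i + 1)).dropWhile (fun x => !pvAltTitle x) := by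
        rw [← pvDrop_len_takeWhile (fun x => !pvAltTitle x) (lines.drop (i + 1)), ← hk,
          List.drop_drop]
      simp only [hspan]
      rw [pvAltLoop_eq lines (i + 1 + k) (by omega), hdropj]
      by_cases hk0 : k = 0
      · have hnil : (lines.drop (i + 1)).takeWhile (fun x => !pvAltTitle x) = [] :=
          List.eq_nil_of_length_eq_zero (hk ▸ hk0)
        rw [if_neg (by omega)]
        simp [pvEmit, hnil, ht]
      · have hne : (lines.drop (i + 1)).takeWhile (fun x => !pvAltTitle x) ≠ [] := by
          intro hnil
          exact hk0 (by rw [hk, hnil]; rfl)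
        rw [if_pos (by omega)]
        have : i + 1 + k - (i + 1) = k := by omega
        rw [this, hk, pvTake_len_takeWhile]
        simp [pvEmit, hne, ht]
    · rw [if_neg ht, pvAltLoop_eq lines (i + 1) (by omega)]
      simp [ht]
  · rw [dif_neg h, List.drop_eq_nil_of_le (by omega)]
    simp [pvGo]
termination_by lines.length - i
decreasing_by
  · omega
  · omega

-- ===== VERDICT (by name: the statement is the Claim_ definition above) =====
theorem split_into_scenes_py_spec : Claim_equal_split_into_scenes_py := by
  intro s _
  show _ = _
  unfold split_into_scenes_py split_into_scenes_py_alt pvNormText pvAltNormText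
  have h1 := pvFold_prologue (((PySem.Str.split? (PySem.Str.join "\n"
    ((((PySem.Str.split? s "\n").getD []).filter (fun l => PySem.Str.strip l ≠ "")).map PySem.Str.strip)) "\n")).getD []) [] []
  have h2 := pvAltLoop_eq (((PySem.Str.split? (PySem.Str.join "\n"
    ((((PySem.Str.split? s "\n").getD []).filter (fun l => PySem.Str.strip l ≠ "")).map PySem.Str.strip)) "\n")).getD []) 0 (Nat.zero_le _)
  simp only [List.drop_zero] at h2
  simpa [pvFinish] using h1.trans h2.symm
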